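-- pv_equiv track=rewrite | github.com/ai-kmu/etc | algorithm/2026/0412_1630_Arithmetic_Subarrays/Taejin.py | checkArithmeticSubarrays
-- ===== SOURCE A (Python) =====
-- from typing import List
--
-- def checkArithmeticSubarrays(nums: List[int], l: List[int], r: List[int]) -> List[bool]:
--     ret = []
--
--     def is_arithmetic(arr):
--         if len(arr) < 3:
--             return True
--
--         else:
--             for i in range(1, len(arr) - 1):
--                 if arr[i] - arr[i - 1] != arr[i + 1] - arr[i]:
--                     return False
--
--         return True
--
--     for i in range(len(l)):
--         temp = nums[l[i]:r[i]+1]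
--         temp.sort()
--         ret.append(is_arithmetic(temp))
--
--     return ret
-- ===== SOURCE B (Python) =====
-- def checkArithmeticSubarrays(nums, l, r):
--     def ok(seg):
--         k = len(seg)
--         if k < 3:
--             return True
--         lo, hi = min(seg), max(seg)
--         if (hi - lo) % (k - 1) != 0:
--             return False
--         d = (hi - lo) // (k - 1)
--         if d == 0:
--             return True
--         s = set(seg)
--         return all(lo + i * d in s for i in range(k))
--     return [ok(nums[a:b + 1]) for a, b in zip(l, r)]
-- ===== Notes on version B (the rewrite author's own statement) =====
-- stated objective: faster
-- what changed: Instead of sorting each slice and scanning consecutive differences, B computes min and max of the slice, checks (max-min) divisibility by k-1, and verifies each expected term min+i*d is in a set of the slice, removing the per-query sort.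
import Mathlib
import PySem

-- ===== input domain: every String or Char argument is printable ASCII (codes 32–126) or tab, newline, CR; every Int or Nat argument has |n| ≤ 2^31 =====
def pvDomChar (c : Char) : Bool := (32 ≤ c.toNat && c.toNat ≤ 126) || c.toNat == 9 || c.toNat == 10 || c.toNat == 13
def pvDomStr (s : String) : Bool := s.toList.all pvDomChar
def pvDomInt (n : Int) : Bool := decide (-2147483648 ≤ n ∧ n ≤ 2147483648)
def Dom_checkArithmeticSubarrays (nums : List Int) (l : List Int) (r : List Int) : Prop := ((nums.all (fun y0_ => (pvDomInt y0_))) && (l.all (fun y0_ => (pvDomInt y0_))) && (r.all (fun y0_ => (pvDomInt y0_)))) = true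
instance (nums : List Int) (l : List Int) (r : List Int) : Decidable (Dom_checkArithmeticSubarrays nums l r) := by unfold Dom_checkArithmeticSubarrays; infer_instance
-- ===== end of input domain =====

-- B replaces sort-then-scan per query by min/max + membership in a set of the slice:
-- O(k) expected per query instead of O(k log k); equal return values proved on Pre_ below.

-- ===== PORT A =====
-- is_arithmetic(arr): the early-return scan over i in range(1, len(arr)-1) is the .all over that range
def pvIsArithmetic (arr : List Int) : Bool :=
  if arr.length < 3 then true
  else (PySem.List.pyRange 1 ((arr.length : Int) - 1) 1).all (fun i =>
    PySem.List.pyGetD arr i 0 - PySem.List.pyGetD arr (i - 1) 0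
      == PySem.List.pyGetD arr (i + 1) 0 - PySem.List.pyGetD arr i 0)

def checkArithmeticSubarrays (nums : List Int) (l : List Int) (r : List Int) : List Bool :=
  (PySem.List.pyRange 0 (l.length : Int) 1).foldl (fun ret i =>
    let temp := PySem.List.sorted
      (PySem.List.slice nums (some (PySem.List.pyGetD l i 0)) (some (PySem.List.pyGetD r i 0 + 1)))
      (fun x => x) false
    ret ++ [pvIsArithmetic temp]) []

-- ===== PORT B =====
def pvOk (seg : List Int) : Bool :=
  let k := seg.length
  if k < 3 then true
  else
    match PySem.List.min? seg (fun x => x), PySem.List.max? seg (fun x => x) with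
    | some lo, some hi =>
      if PySem.Int.mod (hi - lo) ((k : Int) - 1) != 0 then false
      else
        let d := PySem.Int.floordiv (hi - lo) ((k : Int) - 1)
        if d == 0 then true
        else
          let s := PySem.Set.ofList seg
          (PySem.List.pyRange 0 (k : Int) 1).all (fun i => PySem.Set.contains s (lo + i * d))
    | _, _ => true   -- unreachable: k ≥ 3 means seg ≠ []

def checkArithmeticSubarrays_alt (nums : List Int) (l : List Int) (r : List Int) : List Bool :=
  (l.zip r).map (fun p => pvOk (PySem.List.slice nums (some p.1) (some (p.2 + 1))))

-- ===== PRECONDITION & SPEC =====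
-- Pre_ excludes len(r) < len(l), where A raises IndexError reading r[i].
def Pre_checkArithmeticSubarrays (nums : List Int) (l : List Int) (r : List Int) : Prop :=
  l.length ≤ r.length
instance (nums : List Int) (l : List Int) (r : List Int) : Decidable (Pre_checkArithmeticSubarrays nums l r) := by unfold Pre_checkArithmeticSubarrays; infer_instance
def pvWitness_checkArithmeticSubarrays : List Int × List Int × List Int := ([1, 3, 5, 2], [0, 1], [2, 3])

def Spec_checkArithmeticSubarrays (nums : List Int) (l : List Int) (r : List Int) (out : List Bool) : Prop := out = checkArithmeticSubarrays_alt nums l r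
instance (nums : List Int) (l : List Int) (r : List Int) (out : List Bool) : Decidable (Spec_checkArithmeticSubarrays nums l r out) := by unfold Spec_checkArithmeticSubarrays; infer_instance

-- ===== CLAIM (what is proved, stated in full; the proofs are below) =====
def Claim_equal_checkArithmeticSubarrays : Prop := ∀ (nums : List Int) (l : List Int) (r : List Int), Dom_checkArithmeticSubarrays nums l r → Pre_checkArithmeticSubarrays nums l r → Spec_checkArithmeticSubarrays nums l r (checkArithmeticSubarrays nums l r)

-- ===== LEMMAS AND PROOFS =====

-- the core: on ANY slice, B's min/max + membership test agrees with A's sort-then-scan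
theorem isArith_iff (s : List Int) (h3 : 3 ≤ s.length) :
    pvIsArithmetic s = true ↔
      ∀ j : Nat, j + 2 < s.length →
        s.getD (j+1) 0 - s.getD j 0 = s.getD (j+2) 0 - s.getD (j+1) 0 := by
  unfold pvIsArithmetic
  rw [if_neg (by omega), List.all_eq_true]
  constructor
  · intro h j hj
    have hmem : ((j : Int) + 1) ∈ PySem.List.pyRange 1 ((s.length : Int) - 1) 1 := by
      rw [PySem.List.mem_pyRange_one]; omega
    have hx := h _ hmem
    simp only [beq_iff_eq] at hx
    rw [show (j : Int) + 1 - 1 = ((j : Nat) : Int) by push_cast; ring,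
        show (j : Int) + 1 + 1 = (((j + 2 : Nat)) : Int) by push_cast; ring,
        show (j : Int) + 1 = (((j + 1 : Nat)) : Int) by push_cast; ring,
        PySem.List.pyGetD_natCast, PySem.List.pyGetD_natCast, PySem.List.pyGetD_natCast] at hx
    exact hx
  · intro h x hmem
    rw [PySem.List.mem_pyRange_one] at hmem
    obtain ⟨j, rfl⟩ : ∃ j : Nat, x = (j : Int) + 1 := ⟨(x - 1).toNat, by omega⟩
    simp only [beq_iff_eq]
    rw [show (j : Int) + 1 - 1 = ((j : Nat) : Int) by push_cast; ring,
        show (j : Int) + 1 + 1 = (((j + 2 : Nat)) : Int) by push_cast; ring,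
        show (j : Int) + 1 = (((j + 1 : Nat)) : Int) by push_cast; ring,
        PySem.List.pyGetD_natCast, PySem.List.pyGetD_natCast, PySem.List.pyGetD_natCast]
    exact h j (by omega)

theorem step_const (s : List Int)
    (C : ∀ j : Nat, j + 2 < s.length → s.getD (j+1) 0 - s.getD j 0 = s.getD (j+2) 0 - s.getD (j+1) 0) :
    ∀ j : Nat, j + 1 < s.length → s.getD (j+1) 0 - s.getD j 0 = s.getD 1 0 - s.getD 0 0 := by
  intro j
  induction j with
  | zero => intro _; rfl
  | succ n ih =>
    intro h
    have h1 := C n (by omega)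
    have h2 := ih (by omega)
    rw [show n+1+1 = n+2 from rfl]
    omega

theorem closed_form (s : List Int)
    (C : ∀ j : Nat, j + 2 < s.length → s.getD (j+1) 0 - s.getD j 0 = s.getD (j+2) 0 - s.getD (j+1) 0) :
    ∀ j : Nat, j < s.length → s.getD j 0 = s.getD 0 0 + j * (s.getD 1 0 - s.getD 0 0) := by
  intro j
  induction j with
  | zero => intro _; simp
  | succ n ih =>
    intro h
    have h1 := step_const s C n (by omega)
    have h2 := ih (by omega)
    have : s.getD (n+1) 0 = s.getD n 0 + (s.getD 1 0 - s.getD 0 0) := by omega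
    rw [this, h2]; push_cast; ring

theorem pvOk_eq_isArithmetic_sorted (t : List Int) :
    pvIsArithmetic (PySem.List.sorted t (fun x => x) false) = pvOk t := by
  have hperm : (PySem.List.sorted t (fun x => x) false).Perm t := PySem.List.sorted_perm t _ _
  set s := PySem.List.sorted t (fun x => x) false with hs
  have hlen : s.length = t.length := hperm.length_eq
  by_cases h3 : t.length < 3
  · unfold pvIsArithmetic pvOk
    rw [if_pos (by omega), if_pos h3]
  · push_neg at h3
    have hne : t ≠ [] := by intro h; rw [h] at h3; simp at h3
    obtain ⟨lo, hlo⟩ : ∃ lo, PySem.List.min? t (fun x => x) = some lo := by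
      cases h : PySem.List.min? t (fun x => x) with
      | none => exact absurd ((PySem.List.min?_eq_none_iff _ _).mp h) hne
      | some lo => exact ⟨lo, rfl⟩
    obtain ⟨hi, hhi⟩ : ∃ hi, PySem.List.max? t (fun x => x) = some hi := by
      cases h : PySem.List.max? t (fun x => x) with
      | none => exact absurd ((PySem.List.max?_eq_none_iff _ _).mp h) hne
      | some hi => exact ⟨hi, rfl⟩
    have hlo_min : ∀ x ∈ t, lo ≤ x := fun x hx => PySem.List.min?_isMin hlo x hx
    have hhi_max : ∀ x ∈ t, x ≤ hi := fun x hx => PySem.List.max?_isMax hhi x hx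
    have sp : s.Pairwise (fun a b => a ≤ b) := PySem.List.sorted_pairwise t _
    have hpget := List.pairwise_iff_getElem.mp sp
    have hmem_ts : ∀ m : Nat, (hm : m < s.length) → s.getD m 0 ∈ t := by
      intro m hm
      rw [List.getD_eq_getElem _ _ hm]
      exact hperm.subset (List.getElem_mem hm)
    -- the sorted list starts at the min and ends at the max
    have hlo0 : s.getD 0 0 = lo := by
      refine le_antisymm ?_ (hlo_min _ (hmem_ts 0 (by omega)))
      obtain ⟨i, hi', hieq⟩ := List.getElem_of_mem (hperm.mem_iff.mpr (PySem.List.min?_mem hlo))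
      rcases Nat.eq_zero_or_pos i with h0 | h0
      · subst h0; rw [List.getD_eq_getElem _ _ (by omega)]; omega
      · rw [List.getD_eq_getElem _ _ (by omega), ← hieq]
        exact hpget 0 i (by omega) hi' h0
    have hhiL : s.getD (s.length - 1) 0 = hi := by
      refine le_antisymm (hhi_max _ (hmem_ts _ (by omega))) ?_
      obtain ⟨i, hi', hieq⟩ := List.getElem_of_mem (hperm.mem_iff.mpr (PySem.List.max?_mem hhi))
      rcases Nat.lt_or_ge i (s.length - 1) with h0 | h0
      · rw [List.getD_eq_getElem _ _ (by omega), ← hieq]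
        exact hpget i (s.length - 1) hi' (by omega) h0
      · rw [List.getD_eq_getElem _ _ (by omega)]
        have : i = s.length - 1 := by omega
        subst this; omega
    have hk1 : (0 : Int) < (t.length : Int) - 1 := by omega
    unfold pvOk
    rw [if_neg (by omega : ¬ t.length < 3), hlo, hhi]
    dsimp only
    have hcast : (((s.length - 1 : Nat)) : Int) = (t.length : Int) - 1 := by omega
    by_cases hmod : PySem.Int.mod (hi - lo) ((t.length : Int) - 1) = 0
    · rw [if_neg (by simp [hmod])]
      set d := PySem.Int.floordiv (hi - lo) ((t.length : Int) - 1) with hd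
      have hm : (hi - lo) % ((t.length : Int) - 1) = 0 := by
        rw [← PySem.Int.mod_eq_emod_of_pos hk1]; exact hmod
      have hdvd : hi - lo = ((t.length : Int) - 1) * d := by
        rw [hd, PySem.Int.floordiv_eq_ediv_of_pos hk1]
        have := Int.ediv_add_emod (hi - lo) ((t.length : Int) - 1)
        omega
      by_cases hd0 : d = 0
      · rw [if_pos (by simp [hd0])]
        rw [hd0, mul_zero] at hdvd
        have hall_eq : ∀ x ∈ t, x = lo := fun x hx =>
          le_antisymm (by have := hhi_max x hx; omega) (hlo_min x hx)
        rw [isArith_iff s (by omega)]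
        intro j hj
        have e1 := hall_eq _ (hmem_ts j (by omega))
        have e2 := hall_eq _ (hmem_ts (j+1) (by omega))
        have e3 := hall_eq _ (hmem_ts (j+2) (by omega))
        omega
      · rw [if_neg (by simp [hd0])]
        have hdpos : 0 < d := by
          have hlohi : lo ≤ hi := hhi_max lo (PySem.List.min?_mem hlo)
          rcases lt_trichotomy d 0 with h | h | h
          · exact absurd hdvd (by have := mul_neg_of_pos_of_neg hk1 h; omega)
          · exact absurd h hd0
          · exact h
        rw [Bool.eq_iff_iff, isArith_iff s (by omega), List.all_eq_true]
        constructor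
        · intro C x hx
          have he : s.getD 1 0 - s.getD 0 0 = d := by
            have hlast := closed_form s C (s.length - 1) (by omega)
            rw [hhiL, hcast] at hlast
            have h2 : ((t.length : Int) - 1) * (s.getD 1 0 - s.getD 0 0) = ((t.length : Int) - 1) * d := by
              linarith [hlast, hlo0, hdvd]
            exact mul_left_cancel₀ (by omega) h2
          rw [PySem.List.mem_pyRange_one] at hx
          obtain ⟨j, rfl⟩ : ∃ j : Nat, x = (j : Int) := ⟨x.toNat, by omega⟩
          have hjlen : j < s.length := by omega
          have hcf := closed_form s C j hjlen
          rw [he, hlo0] at hcf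
          have : lo + (j : Int) * d ∈ t := by rw [← hcf]; exact hmem_ts j hjlen
          simp [PySem.Set.contains, PySem.Set.mem_ofList, this]
        · intro hall
          have hnd : ((List.range t.length).map (fun j : Nat => lo + (j : Int) * d)).Pairwise (· < ·) := by
            refine List.Pairwise.map _ ?_ List.pairwise_lt_range
            intro a b hab
            have : ((a : Int)) < ((b : Int)) := by exact_mod_cast hab
            nlinarith
          have hsub : ((List.range t.length).map (fun j : Nat => lo + (j : Int) * d)) ⊆ t := by
            intro x hx
            simp only [List.mem_map, List.mem_range] at hx
            obtain ⟨j, hj, rfl⟩ := hx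
            have := hall (j : Int) (by rw [PySem.List.mem_pyRange_one]; omega)
            simpa [PySem.Set.contains, PySem.Set.mem_ofList] using this
          have hnodup : ((List.range t.length).map (fun j : Nat => lo + (j : Int) * d)).Nodup :=
            List.Pairwise.imp (fun h => ne_of_lt h) hnd
          have hperm2 : ((List.range t.length).map (fun j : Nat => lo + (j : Int) * d)).Perm t :=
            (hnodup.subperm hsub).perm_of_length_le (by simp)
          have hseq : s = (List.range t.length).map (fun j : Nat => lo + (j : Int) * d) :=
            PySem.List.sorted_eq_of_perm_of_pairwise_lt t _ _ hperm2 hnd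
          intro j hj
          have gd : ∀ m : Nat, m < t.length →
              ((List.range t.length).map (fun j : Nat => lo + (j : Int) * d)).getD m 0 = lo + (m : Int) * d := by
            intro m hm
            rw [List.getD_eq_getElem _ _ (by simpa using hm)]
            simp
          rw [hseq, gd j (by omega), gd (j+1) (by omega), gd (j+2) (by omega)]
          push_cast; ring
    · rw [if_pos (by simp [hmod])]
      rcases Bool.eq_false_or_eq_true (pvIsArithmetic s) with h | h
      · exfalso
        have C := (isArith_iff s (by omega)).mp h
        have hlast := closed_form s C (s.length - 1) (by omega)
        rw [hhiL, hcast] at hlast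
        apply hmod
        rw [PySem.Int.mod_eq_emod_of_pos hk1]
        have hx : hi - lo = ((t.length : Int) - 1) * (s.getD 1 0 - s.getD 0 0) := by
          linarith [hlast, hlo0]
        rw [hx]
        exact Int.mul_emod_right _ _
      · exact h


-- ===== VERDICT (by name: the statement is the Claim_ definition above) =====
theorem checkArithmeticSubarrays_spec : Claim_equal_checkArithmeticSubarrays := by
  intro nums l r _ hpre
  unfold Pre_checkArithmeticSubarrays at hpre
  unfold Spec_checkArithmeticSubarrays checkArithmeticSubarrays checkArithmeticSubarrays_alt
  rw [PySem.List.foldl_append_singleton_eq_map]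
  apply List.ext_getElem
  · simp [PySem.List.length_pyRange_one]
    omega
  · intro i h1 h2
    simp only [List.nil_append, List.getElem_map, List.getElem_zip,
      PySem.List.getElem_pyRange_one, zero_add]
    have hi : i < l.length := by
      simpa [PySem.List.length_pyRange_one] using h1
    have hir : i < r.length := lt_of_lt_of_le hi hpre
    rw [PySem.List.pyGetD_natCast, PySem.List.pyGetD_natCast,
        List.getD_eq_getElem _ _ hi, List.getD_eq_getElem _ _ hir]
    exact pvOk_eq_isArithmetic_sorted _
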